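-- pv_equiv track=rewrite | github.com/rafasidiaz/multimodal_badminton_evaluation | utils/improved_models.py | _adjust_indices_for_subset
-- ===== SOURCE A (Python) =====
-- def _adjust_indices_for_subset(subset, cnn_sensors, lstm_sensors):
--     """
--     Ajusta los índices relativos al array procesado (no al original)
--     """
--     # Mapeo de índices originales -> índices en el array procesado
--     if subset == 'allStreams':
--         # No hay cambios, usar índices directos
--         return cnn_sensors, lstm_sensors
--
--     elif subset == 'noGforce':
--         # Array: [0:2] eye + [18:121] resto
--         # Ajustar índices
--         new_cnn = []
--         new_lstm = []
--
--         for idx in cnn_sensors: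
--             if idx >= 18:
--                 new_cnn.append(idx - 16)  # Shift por los 16 eliminados
--
--         for idx in lstm_sensors:
--             if idx < 2:
--                 new_lstm.append(idx)
--             elif idx >= 18:
--                 new_lstm.append(idx - 16)
--
--         return new_cnn, new_lstm
--
--     elif subset == 'noCognionics':
--         # Array: [0:18] eye+gforce + [22:121] resto
--         new_cnn = []
--         new_lstm = []
--
--         for idx in cnn_sensors:
--             if idx < 18:
--                 new_cnn.append(idx)
--             elif idx >= 22:
--                 new_cnn.append(idx - 4)
--
--         for idx in lstm_sensors:
--             if idx < 18:
--                 new_lstm.append(idx)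
--             elif idx >= 22:
--                 new_lstm.append(idx - 4)
--
--         return new_cnn, new_lstm
--
--     elif subset == 'noEye':
--         # Array: [2:121] todo excepto eye
--         new_cnn = [idx - 2 for idx in cnn_sensors if idx >= 2]
--         new_lstm = [idx - 2 for idx in lstm_sensors if idx >= 2]
--         return new_cnn, new_lstm
--
--     elif subset == 'noInsole':
--         # Array: [0:22] + [58:121]
--         new_cnn = []
--         new_lstm = []
--
--         for idx in cnn_sensors:
--             if idx < 22:
--                 new_cnn.append(idx)
--             elif idx >= 58:
--                 new_cnn.append(idx - 36)
--
--         for idx in lstm_sensors: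
--             if idx < 22:
--                 new_lstm.append(idx)
--             elif idx >= 58:
--                 new_lstm.append(idx - 36)
--
--         return new_cnn, new_lstm
--
--     elif subset == 'noBody':
--         # Array: [0:58] solo hasta insole
--         new_cnn = [idx for idx in cnn_sensors if idx < 58]
--         new_lstm = [idx for idx in lstm_sensors if idx < 58]
--         return new_cnn, new_lstm
--
--     elif subset == 'onlyGforce':
--         # Array: [2:18] -> [0:16]
--         return [], list(range(0, 16))
--
--     elif subset == 'onlyEye':
--         # Array: [0:2]
--         return [], [0, 1]
--
--     elif subset == 'onlyInsole':
--         # Array: [22:58] -> [0:36]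
--         return list(range(0, 36)), []
--
--     elif subset == 'onlyBody':
--         # Array: [58:121] -> [0:63]
--         return list(range(0, 63)), []
--
--     return cnn_sensors, lstm_sensors
-- ===== SOURCE B (Python) =====
-- # Table-driven remapping: constant outputs for only* subsets, kept-interval
-- # rules (lo, hi, shift) per stream otherwise; one helper applies the rules.
--
-- _CONST = {
--     'onlyGforce': ([], list(range(0, 16))),
--     'onlyEye': ([], [0, 1]),
--     'onlyInsole': (list(range(0, 36)), []),
--     'onlyBody': (list(range(0, 63)), []),
-- }
--
-- # intervals are [lo, hi) with None = unbounded; value kept as idx + shift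
-- _NO_GFORCE_LSTM = [(None, 2, 0), (18, None, -16)]
-- _KEEP_MID = [(None, 18, 0), (22, None, -4)]
-- _NO_INSOLE = [(None, 22, 0), (58, None, -36)]
-- _RULES = {
--     'noGforce': ([(18, None, -16)], _NO_GFORCE_LSTM),
--     'noCognionics': (_KEEP_MID, _KEEP_MID),
--     'noEye': ([(2, None, -2)], [(2, None, -2)]),
--     'noInsole': (_NO_INSOLE, _NO_INSOLE),
--     'noBody': ([(None, 58, 0)], [(None, 58, 0)]),
-- }
--
--
-- def _apply(rules, lst):
--     return [i + s
--             for i in lst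
--             for (lo, hi, s) in rules
--             if (lo is None or i >= lo) and (hi is None or i < hi)]
--
--
-- def _adjust_indices_for_subset(subset, cnn_sensors, lstm_sensors):
--     if subset in _CONST:
--         return _CONST[subset]
--     if subset in _RULES:
--         cnn_rules, lstm_rules = _RULES[subset]
--         return _apply(cnn_rules, cnn_sensors), _apply(lstm_rules, lstm_sensors)
--     return cnn_sensors, lstm_sensors
-- ===== Notes on version B (the rewrite author's own statement) =====
-- stated objective: simpler
-- what changed: Replaces the ten-branch if/elif chain of hand-written loops by a data-driven table mapping each subset to either a constant output pair or per-stream kept-interval (lo, hi, shift) rules, applied by a single generic helper.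
import Mathlib
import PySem

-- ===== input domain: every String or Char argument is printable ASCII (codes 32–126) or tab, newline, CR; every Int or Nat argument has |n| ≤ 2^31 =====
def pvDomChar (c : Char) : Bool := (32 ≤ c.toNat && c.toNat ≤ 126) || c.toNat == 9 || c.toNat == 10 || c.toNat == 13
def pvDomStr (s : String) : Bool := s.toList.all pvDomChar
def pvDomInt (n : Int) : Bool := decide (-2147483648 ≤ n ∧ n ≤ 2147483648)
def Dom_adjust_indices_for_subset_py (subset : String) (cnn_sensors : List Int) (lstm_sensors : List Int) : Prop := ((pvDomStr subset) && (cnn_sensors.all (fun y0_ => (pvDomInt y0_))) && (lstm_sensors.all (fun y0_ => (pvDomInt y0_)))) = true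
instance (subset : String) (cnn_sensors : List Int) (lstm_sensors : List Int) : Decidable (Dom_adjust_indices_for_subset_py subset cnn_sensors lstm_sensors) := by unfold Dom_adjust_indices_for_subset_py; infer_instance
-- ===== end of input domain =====

-- B replaces A's ten-branch if/elif chain by a table of kept-interval (lo, hi, shift)
-- rules per subset plus one generic helper applying them (objective: simpler).

-- ===== PORT A =====
def adjust_indices_for_subset_py (subset : String) (cnn_sensors : List Int) (lstm_sensors : List Int) : List Int × List Int :=
  if subset == "allStreams" then
    (cnn_sensors, lstm_sensors)
  else if subset == "noGforce" then
    let new_cnn := cnn_sensors.foldl (fun acc idx => if idx ≥ 18 then acc ++ [idx - 16] else acc) []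
    let new_lstm := lstm_sensors.foldl (fun acc idx =>
      if idx < 2 then acc ++ [idx] else if idx ≥ 18 then acc ++ [idx - 16] else acc) []
    (new_cnn, new_lstm)
  else if subset == "noCognionics" then
    let new_cnn := cnn_sensors.foldl (fun acc idx =>
      if idx < 18 then acc ++ [idx] else if idx ≥ 22 then acc ++ [idx - 4] else acc) []
    let new_lstm := lstm_sensors.foldl (fun acc idx =>
      if idx < 18 then acc ++ [idx] else if idx ≥ 22 then acc ++ [idx - 4] else acc) []
    (new_cnn, new_lstm)
  else if subset == "noEye" then
    ((cnn_sensors.filter (fun idx => idx ≥ 2)).map (fun idx => idx - 2),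
     (lstm_sensors.filter (fun idx => idx ≥ 2)).map (fun idx => idx - 2))
  else if subset == "noInsole" then
    let new_cnn := cnn_sensors.foldl (fun acc idx =>
      if idx < 22 then acc ++ [idx] else if idx ≥ 58 then acc ++ [idx - 36] else acc) []
    let new_lstm := lstm_sensors.foldl (fun acc idx =>
      if idx < 22 then acc ++ [idx] else if idx ≥ 58 then acc ++ [idx - 36] else acc) []
    (new_cnn, new_lstm)
  else if subset == "noBody" then
    (cnn_sensors.filter (fun idx => idx < 58), lstm_sensors.filter (fun idx => idx < 58))
  else if subset == "onlyGforce" then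
    ([], PySem.List.pyRange 0 16 1)
  else if subset == "onlyEye" then
    ([], [0, 1])
  else if subset == "onlyInsole" then
    (PySem.List.pyRange 0 36 1, [])
  else if subset == "onlyBody" then
    (PySem.List.pyRange 0 63 1, [])
  else
    (cnn_sensors, lstm_sensors)

-- ===== PORT B =====
-- (lo, hi, shift) kept-interval rules; none = unbounded, matching Source B's None
def pvApply (rules : List (Option Int × Option Int × Int)) (lst : List Int) : List Int :=
  lst.flatMap (fun i => rules.filterMap (fun r =>
    if ((match r.1 with | none => true | some lo => decide (lo ≤ i)) &&
        (match r.2.1 with | none => true | some hi => decide (i < hi))) then some (i + r.2.2) else none))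

def pvConst : PySem.Dict String (List Int × List Int) :=
  PySem.Dict.ofList
    [("onlyGforce", ([], PySem.List.pyRange 0 16 1)),
     ("onlyEye", ([], [0, 1])),
     ("onlyInsole", (PySem.List.pyRange 0 36 1, [])),
     ("onlyBody", (PySem.List.pyRange 0 63 1, []))]

def pvNoGforceLstm : List (Option Int × Option Int × Int) := [(none, some 2, 0), (some 18, none, -16)]
def pvKeepMid : List (Option Int × Option Int × Int) := [(none, some 18, 0), (some 22, none, -4)]
def pvNoInsole : List (Option Int × Option Int × Int) := [(none, some 22, 0), (some 58, none, -36)]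

def pvRules : PySem.Dict String (List (Option Int × Option Int × Int) × List (Option Int × Option Int × Int)) :=
  PySem.Dict.ofList
    [("noGforce", ([(some 18, none, -16)], pvNoGforceLstm)),
     ("noCognionics", (pvKeepMid, pvKeepMid)),
     ("noEye", ([(some 2, none, -2)], [(some 2, none, -2)])),
     ("noInsole", (pvNoInsole, pvNoInsole)),
     ("noBody", ([(none, some 58, 0)], [(none, some 58, 0)]))]

def adjust_indices_for_subset_py_alt (subset : String) (cnn_sensors : List Int) (lstm_sensors : List Int) : List Int × List Int :=
  match pvConst.get? subset with
  | some p => p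
  | none =>
    match pvRules.get? subset with
    | some (cnn_rules, lstm_rules) => (pvApply cnn_rules cnn_sensors, pvApply lstm_rules lstm_sensors)
    | none => (cnn_sensors, lstm_sensors)

-- ===== PRECONDITION & SPEC =====
def Spec_adjust_indices_for_subset_py (subset : String) (cnn_sensors : List Int) (lstm_sensors : List Int) (out : List Int × List Int) : Prop := out = adjust_indices_for_subset_py_alt subset cnn_sensors lstm_sensors
instance (subset : String) (cnn_sensors : List Int) (lstm_sensors : List Int) (out : List Int × List Int) : Decidable (Spec_adjust_indices_for_subset_py subset cnn_sensors lstm_sensors out) := by unfold Spec_adjust_indices_for_subset_py; infer_instance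

-- ===== CLAIM (what is proved, stated in full; the proofs are below) =====
def Claim_equal_adjust_indices_for_subset_py : Prop := ∀ (subset : String) (cnn_sensors : List Int) (lstm_sensors : List Int), Dom_adjust_indices_for_subset_py subset cnn_sensors lstm_sensors → Spec_adjust_indices_for_subset_py subset cnn_sensors lstm_sensors (adjust_indices_for_subset_py subset cnn_sensors lstm_sensors)

-- ===== LEMMAS AND PROOFS =====

lemma pvApply_cons (rules : List (Option Int × Option Int × Int)) (x : Int) (xs : List Int) :
    pvApply rules (x :: xs) =
      (rules.filterMap (fun r =>
        if ((match r.1 with | none => true | some lo => decide (lo ≤ x)) &&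
            (match r.2.1 with | none => true | some hi => decide (x < hi))) then some (x + r.2.2) else none))
        ++ pvApply rules xs := by
  simp [pvApply]

lemma loop_noGforce_cnn : ∀ (l : List Int) (acc : List Int),
    l.foldl (fun acc idx => if idx ≥ 18 then acc ++ [idx - 16] else acc) acc
      = acc ++ pvApply [(some 18, none, -16)] l := by
  intro l
  induction l with
  | nil => intro acc; simp [pvApply]
  | cons x xs ih =>
    intro acc
    simp only [List.foldl_cons, pvApply_cons]
    by_cases h : x ≥ 18
    · rw [if_pos h, ih]
      simp [h]
      omega
    · rw [if_neg h, ih]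
      simp [h]

lemma loop_noGforce_lstm : ∀ (l : List Int) (acc : List Int),
    l.foldl (fun acc idx => if idx < 2 then acc ++ [idx] else if idx ≥ 18 then acc ++ [idx - 16] else acc) acc
      = acc ++ pvApply pvNoGforceLstm l := by
  intro l
  induction l with
  | nil => intro acc; simp [pvApply]
  | cons x xs ih =>
    intro acc
    simp only [List.foldl_cons, pvApply_cons]
    by_cases h1 : x < 2
    · have h2 : ¬ (18:Int) ≤ x := by omega
      rw [if_pos h1, ih]
      simp [pvNoGforceLstm, h1, h2]
    · rw [if_neg h1]
      by_cases h2 : x ≥ 18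
      · rw [if_pos h2, ih]
        simp [pvNoGforceLstm, h1, h2]
        omega
      · rw [if_neg h2, ih]
        simp [pvNoGforceLstm, h1, h2]

lemma loop_keepMid : ∀ (l : List Int) (acc : List Int),
    l.foldl (fun acc idx => if idx < 18 then acc ++ [idx] else if idx ≥ 22 then acc ++ [idx - 4] else acc) acc
      = acc ++ pvApply pvKeepMid l := by
  intro l
  induction l with
  | nil => intro acc; simp [pvApply]
  | cons x xs ih =>
    intro acc
    simp only [List.foldl_cons, pvApply_cons]
    by_cases h1 : x < 18
    · have h2 : ¬ (22:Int) ≤ x := by omega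
      rw [if_pos h1, ih]
      simp [pvKeepMid, h1, h2]
    · rw [if_neg h1]
      by_cases h2 : x ≥ 22
      · rw [if_pos h2, ih]
        simp [pvKeepMid, h1, h2]
        omega
      · rw [if_neg h2, ih]
        simp [pvKeepMid, h1, h2]

lemma loop_noInsole : ∀ (l : List Int) (acc : List Int),
    l.foldl (fun acc idx => if idx < 22 then acc ++ [idx] else if idx ≥ 58 then acc ++ [idx - 36] else acc) acc
      = acc ++ pvApply pvNoInsole l := by
  intro l
  induction l with
  | nil => intro acc; simp [pvApply]
  | cons x xs ih =>
    intro acc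
    simp only [List.foldl_cons, pvApply_cons]
    by_cases h1 : x < 22
    · have h2 : ¬ (58:Int) ≤ x := by omega
      rw [if_pos h1, ih]
      simp [pvNoInsole, h1, h2]
    · rw [if_neg h1]
      by_cases h2 : x ≥ 58
      · rw [if_pos h2, ih]
        simp [pvNoInsole, h1, h2]
        omega
      · rw [if_neg h2, ih]
        simp [pvNoInsole, h1, h2]

lemma comp_noEye (l : List Int) :
    (l.filter (fun idx => idx ≥ 2)).map (fun idx => idx - 2)
      = pvApply [(some 2, none, -2)] l := by
  induction l with
  | nil => simp [pvApply]
  | cons x xs ih =>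
    rw [pvApply_cons]
    by_cases h : x ≥ 2
    · simp [h, ih]
      omega
    · simp [h, ih]

lemma comp_noBody (l : List Int) :
    l.filter (fun idx => idx < 58) = pvApply [(none, some 58, 0)] l := by
  induction l with
  | nil => simp [pvApply]
  | cons x xs ih =>
    rw [pvApply_cons]
    by_cases h : x < 58
    · simp [h, ih]
    · simp [h, ih]

-- ===== VERDICT (by name: the statement is the Claim_ definition above) =====
theorem adjust_indices_for_subset_py_spec : Claim_equal_adjust_indices_for_subset_py := by
  intro subset cnn lstm _
  unfold Spec_adjust_indices_for_subset_py adjust_indices_for_subset_py adjust_indices_for_subset_py_alt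
  by_cases h0 : subset = "allStreams"
  · subst h0; rfl
  by_cases h1 : subset = "noGforce"
  · subst h1
    have hc : pvConst.get? "noGforce" = none := by rfl
    have hr : pvRules.get? "noGforce" = some ([(some 18, none, -16)], pvNoGforceLstm) := by rfl
    rw [hc, hr]
    simp only [beq_iff_eq, String.reduceEq, reduceIte]
    rw [loop_noGforce_cnn, loop_noGforce_lstm]
    simp
  by_cases h2 : subset = "noCognionics"
  · subst h2
    have hc : pvConst.get? "noCognionics" = none := by rfl
    have hr : pvRules.get? "noCognionics" = some (pvKeepMid, pvKeepMid) := by rfl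
    rw [hc, hr]
    simp only [beq_iff_eq, String.reduceEq, reduceIte]
    rw [loop_keepMid, loop_keepMid]
    simp
  by_cases h3 : subset = "noEye"
  · subst h3
    have hc : pvConst.get? "noEye" = none := by rfl
    have hr : pvRules.get? "noEye" = some ([(some 2, none, -2)], [(some 2, none, -2)]) := by rfl
    rw [hc, hr]
    simp only [beq_iff_eq, String.reduceEq, reduceIte]
    rw [comp_noEye, comp_noEye]
  by_cases h4 : subset = "noInsole"
  · subst h4
    have hc : pvConst.get? "noInsole" = none := by rfl
    have hr : pvRules.get? "noInsole" = some (pvNoInsole, pvNoInsole) := by rfl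
    rw [hc, hr]
    simp only [beq_iff_eq, String.reduceEq, reduceIte]
    rw [loop_noInsole, loop_noInsole]
    simp
  by_cases h5 : subset = "noBody"
  · subst h5
    have hc : pvConst.get? "noBody" = none := by rfl
    have hr : pvRules.get? "noBody" = some ([(none, some 58, 0)], [(none, some 58, 0)]) := by rfl
    rw [hc, hr]
    simp only [beq_iff_eq, String.reduceEq, reduceIte]
    rw [comp_noBody, comp_noBody]
  by_cases h6 : subset = "onlyGforce"
  · subst h6; rfl
  by_cases h7 : subset = "onlyEye"
  · subst h7; rfl
  by_cases h8 : subset = "onlyInsole"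
  · subst h8; rfl
  by_cases h9 : subset = "onlyBody"
  · subst h9; rfl
  · have hc : pvConst.get? subset = none := by
      simp [pvConst, PySem.Dict.ofList, PySem.Dict.get?, PySem.Dict.empty, PySem.Dict.update,
        PySem.Dict.insert, Ne.symm h6, Ne.symm h7, Ne.symm h8, Ne.symm h9]
    have hr : pvRules.get? subset = none := by
      simp [pvRules, PySem.Dict.ofList, PySem.Dict.get?, PySem.Dict.empty, PySem.Dict.update,
        PySem.Dict.insert, Ne.symm h1, Ne.symm h2, Ne.symm h3, Ne.symm h4, Ne.symm h5]
    rw [hc, hr]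
    simp [h0, h1, h2, h3, h4, h5, h6, h7, h8, h9]
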